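-- pv_equiv track=rewrite | github.com/prevostdomitille/optimisation_airport | dm_optim/main/glutton_by_pairs.py | number_of_passengers_by_plane
-- ===== SOURCE A (Python) =====
-- def number_of_passengers_by_plane(junctions, size):
--     number_passengers = []
--     for i in range(size):
--         temp = 0
--         for j in range(size):
--             temp += junctions[j][i]
--             temp += junctions[i][j]
--         number_passengers.insert(i, temp)
--     return number_passengers
-- ===== SOURCE B (Python) =====
-- def number_of_passengers_by_plane(junctions, size):
--     k = max(size, 0)
--     rows = [row[:k] for row in junctions[:k]]
--     row_sums = [sum(row) for row in rows]
--     col_sums = [0] * k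
--     for row in rows:
--         col_sums = [c + v for c, v in zip(col_sums, row)]
--     return [r + c for r, c in zip(row_sums, col_sums)]
-- ===== Notes on version B (the rewrite author's own statement) =====
-- stated objective: alternative
-- what changed: Replaces A's per-index nested rescans (row i and column i re-read for every i) with two table-building passes -- row sums by mapping over the truncated rows, column sums by folding an element-wise zip accumulator over the rows -- combined element-wise at the end.
import Mathlib
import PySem

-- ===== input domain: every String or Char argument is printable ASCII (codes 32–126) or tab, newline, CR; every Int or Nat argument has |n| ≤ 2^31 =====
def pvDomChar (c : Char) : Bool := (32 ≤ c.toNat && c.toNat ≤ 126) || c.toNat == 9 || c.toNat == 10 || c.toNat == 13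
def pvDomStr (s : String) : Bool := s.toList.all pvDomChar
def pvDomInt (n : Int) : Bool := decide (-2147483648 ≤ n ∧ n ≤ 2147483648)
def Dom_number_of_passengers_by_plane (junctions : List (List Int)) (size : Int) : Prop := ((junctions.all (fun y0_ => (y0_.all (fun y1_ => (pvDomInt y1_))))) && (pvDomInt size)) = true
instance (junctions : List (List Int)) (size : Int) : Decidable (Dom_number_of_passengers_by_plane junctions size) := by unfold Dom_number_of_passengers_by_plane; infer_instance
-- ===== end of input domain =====

-- B rebuilds the result from two whole-table passes (row sums and a zip-accumulated column-sum table)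
-- instead of A's per-index rescans; objective: alternative decomposition, same asymptotic cost.

-- ===== PORT A =====
-- junctions[j][i] / junctions[i][j] are ported with pyGetD; exact under Pre_, where every index is in range.
def number_of_passengers_by_plane (junctions : List (List Int)) (size : Int) : List Int :=
  (PySem.List.pyRange 0 size 1).foldl (fun number_passengers i =>
    let temp : Int :=
      (PySem.List.pyRange 0 size 1).foldl (fun temp j =>
        let temp := temp + PySem.List.pyGetD (PySem.List.pyGetD junctions j []) i 0
        temp + PySem.List.pyGetD (PySem.List.pyGetD junctions i []) j 0) 0
    PySem.List.insert number_passengers i temp) []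

-- ===== PORT B =====
-- junctions[:k] / row[:k] with k = max(size,0) ≥ 0 are exactly List.take k (PySem.List.slice_to).
def number_of_passengers_by_plane_alt (junctions : List (List Int)) (size : Int) : List Int :=
  let k : Nat := (max size 0).toNat
  let rows := (junctions.take k).map (fun row => row.take k)
  let row_sums := rows.map (fun row => row.sum)
  let col_sums := rows.foldl (fun cs row => List.zipWith (fun c v => c + v) cs row) (List.replicate k (0 : Int))
  List.zipWith (fun r c => r + c) row_sums col_sums

-- ===== PRECONDITION & SPEC =====
-- Exactly the inputs on which Python A returns (no IndexError): every index i,j < size that the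
-- loops use must be in range, i.e. size ≤ len(junctions) and the first size rows have length ≥ size.
def Pre_number_of_passengers_by_plane (junctions : List (List Int)) (size : Int) : Prop :=
  size ≤ junctions.length ∧ ∀ row ∈ junctions.take size.toNat, size ≤ row.length
instance (junctions : List (List Int)) (size : Int) : Decidable (Pre_number_of_passengers_by_plane junctions size) := by unfold Pre_number_of_passengers_by_plane; infer_instance
def pvWitness_number_of_passengers_by_plane : List (List Int) × Int := ([[1, 2], [3, 4]], 2)

def Spec_number_of_passengers_by_plane (junctions : List (List Int)) (size : Int) (out : List Int) : Prop := out = number_of_passengers_by_plane_alt junctions size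
instance (junctions : List (List Int)) (size : Int) (out : List Int) : Decidable (Spec_number_of_passengers_by_plane junctions size out) := by unfold Spec_number_of_passengers_by_plane; infer_instance

-- ===== CLAIM (what is proved, stated in full; the proofs are below) =====
def Claim_equal_number_of_passengers_by_plane : Prop := ∀ (junctions : List (List Int)) (size : Int), Dom_number_of_passengers_by_plane junctions size → Pre_number_of_passengers_by_plane junctions size → Spec_number_of_passengers_by_plane junctions size (number_of_passengers_by_plane junctions size)

-- ===== LEMMAS AND PROOFS =====

-- a prefix of a list is the table of its own getD values
theorem take_eq_map_range_getD {α : Type} (l : List α) (d : α) (n : Nat) (h : n ≤ l.length) :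
    l.take n = (List.range n).map (fun i => l.getD i d) := by
  apply List.ext_getElem
  · simp [h]
  · intro i h1 h2
    have hi : i < n := by simpa [h] using h1
    have hil : i < l.length := lt_of_lt_of_le hi h
    simp [List.getElem_take, List.getD_eq_getElem?_getD, List.getElem?_eq_getElem hil]

-- A's insert-at-i loop builds the list of per-index values, in index order
theorem foldl_insert_eq_map (n : Nat) (f : Int → Int) :
    ((List.range n).map (fun (k : Nat) => (k : Int))).foldl
      (fun acc i => PySem.List.insert acc i (f i)) []
    = (List.range n).map (fun (k : Nat) => f (k : Int)) := by
  induction n with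
  | zero => rfl
  | succ m ih =>
    rw [List.range_succ]
    simp only [List.map_append, List.foldl_append, ih, List.map_cons, List.map_nil,
      List.foldl_cons, List.foldl_nil]
    rw [PySem.List.insert_natCast _ m _ (by simp),
      List.take_of_length_le (by simp), List.drop_eq_nil_of_le (by simp)]

-- B's zip-accumulator fold: the column-sum table, pointwise
theorem foldl_zipWith_add (rows : List (List Int)) (cs : List Int)
    (h : ∀ r ∈ rows, r.length = cs.length) :
    rows.foldl (fun cs row => List.zipWith (fun c v => c + v) cs row) cs
    = (List.range cs.length).map (fun i => cs.getD i 0 + (rows.map (fun r => r.getD i 0)).sum) := by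
  induction rows generalizing cs with
  | nil =>
    simp only [List.foldl_nil, List.map_nil, List.sum_nil, add_zero]
    calc cs = cs.take cs.length := by simp
      _ = _ := take_eq_map_range_getD cs 0 cs.length le_rfl
  | cons r rest ih =>
    have hr : r.length = cs.length := h r (by simp)
    have hlen : (List.zipWith (fun c v => c + v) cs r).length = cs.length := by
      simp [hr]
    rw [List.foldl_cons, ih _ (by intro x hx; rw [hlen]; exact h x (List.mem_cons_of_mem _ hx)), hlen]
    apply List.map_congr_left
    intro i hi
    have hi' : i < cs.length := List.mem_range.mp hi
    have hir : i < r.length := by omega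
    have hz : (List.zipWith (fun c v => c + v) cs r).getD i 0 = cs.getD i 0 + r.getD i 0 := by
      rw [List.getD_eq_getElem _ _ (by omega : i < (List.zipWith (fun c v => c + v) cs r).length),
        List.getElem_zipWith, List.getD_eq_getElem cs 0 hi', List.getD_eq_getElem r 0 hir]
    rw [hz, List.map_cons, List.sum_cons]
    ring

-- zipWith of two maps over the same index list is a single map
theorem zipWith_map_same {α : Type} (l : List α) (f g : α → Int) :
    List.zipWith (fun r c => r + c) (l.map f) (l.map g) = l.map (fun x => f x + g x) := by
  induction l with
  | nil => rfl
  | cons x xs ih => simp [ih]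

theorem number_of_passengers_by_plane_eq (junctions : List (List Int)) (size : Int)
    (hpre : Pre_number_of_passengers_by_plane junctions size) :
    number_of_passengers_by_plane junctions size
    = number_of_passengers_by_plane_alt junctions size := by
  obtain ⟨hsz, hrowpre⟩ := hpre
  set n : Nat := size.toNat with hn
  have hnle : n ≤ junctions.length := by omega
  set M : Nat → Nat → Int := fun i j => (junctions.getD i []).getD j 0 with hM
  have hrowlen : ∀ i < n, n ≤ (junctions.getD i []).length := by
    intro i hi
    have hmem : junctions.getD i [] ∈ junctions.take n := by
      have hlt : i < (junctions.take n).length := by simp; omega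
      have : (junctions.take n)[i] = junctions.getD i [] := by
        rw [List.getElem_take, List.getD_eq_getElem junctions [] (by omega : i < junctions.length)]
      exact this ▸ List.getElem_mem hlt
    have := hrowpre _ hmem
    omega
  -- ---- A equals the index-order table of (column sum + row sum) ----
  have hA : number_of_passengers_by_plane junctions size
      = (List.range n).map (fun i =>
          ((List.range n).map (fun j => M j i)).sum + ((List.range n).map (fun j => M i j)).sum) := by
    unfold number_of_passengers_by_plane
    have hcast : (size - 0).toNat = n := by omega
    rw [PySem.List.pyRange_one, hcast]
    simp only [zero_add]
    rw [foldl_insert_eq_map n (fun i => (List.map (fun (k : Nat) => (k : Int)) (List.range n)).foldl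
      (fun temp j =>
        temp + PySem.List.pyGetD (PySem.List.pyGetD junctions j []) i 0
          + PySem.List.pyGetD (PySem.List.pyGetD junctions i []) j 0) 0)]
    apply List.map_congr_left
    intro i hi
    simp only [List.foldl_map]
    rw [List.foldl_ext _ (fun (temp : Int) (j : Nat) => temp + (M j i + M i j)) 0
      (by intro t j _; simp only [PySem.List.pyGetD_natCast, hM]; ring)]
    rw [PySem.List.foldl_add, PySem.List.sum_map_add_int]
    simp
  -- ---- B equals the same table with the two sums swapped ----
  have hrows : (junctions.take n).map (fun row => row.take n)
      = (List.range n).map (fun i => (List.range n).map (fun j => M i j)) := by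
    rw [take_eq_map_range_getD junctions [] n hnle, List.map_map]
    apply List.map_congr_left
    intro i hi
    exact take_eq_map_range_getD _ 0 n (hrowlen i (List.mem_range.mp hi))
  have hB : number_of_passengers_by_plane_alt junctions size
      = (List.range n).map (fun i =>
          ((List.range n).map (fun j => M i j)).sum + ((List.range n).map (fun j => M j i)).sum) := by
    unfold number_of_passengers_by_plane_alt
    have hk : (max size 0).toNat = n := by omega
    simp only [hk, hrows]
    rw [foldl_zipWith_add _ _ (by intro r hr; simp at hr; obtain ⟨a, _, rfl⟩ := hr; simp),
      List.length_replicate, List.map_map]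
    rw [zipWith_map_same]
    apply List.map_congr_left
    intro i hi
    have hi' : i < n := List.mem_range.mp hi
    have hrep : (List.replicate n (0 : Int)).getD i 0 = 0 := by
      rw [List.getD_eq_getElem _ _ (by simpa using hi')]
      simp
    rw [hrep, zero_add, List.map_map]
    congr 1
    refine congrArg List.sum (List.map_congr_left ?_)
    intro r hr
    simp only [Function.comp]
    exact PySem.List.getD_map_range _ n i 0 hi'
  rw [hA, hB]
  apply List.map_congr_left
  intro i _
  ring

-- ===== VERDICT (by name: the statement is the Claim_ definition above) =====
theorem number_of_passengers_by_plane_spec : Claim_equal_number_of_passengers_by_plane := by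
  intro junctions size _ hpre
  unfold Spec_number_of_passengers_by_plane
  exact number_of_passengers_by_plane_eq junctions size hpre
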